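-- pv_equiv track=rewrite | github.com/helix-drop/OCRandTranslation | text_processing.py | resolve_visible_page_bp
-- ===== SOURCE A (Python) =====
-- def is_placeholder_page(page: dict | None) -> bool:
--     return bool((page or {}).get("isPlaceholder"))
--
-- def build_visible_page_view(pages: list[dict]) -> dict:
--     ordered_pages = [
--         page for page in (pages or [])
--         if isinstance(page, dict) and page.get("bookPage") is not None
--     ]
--     hidden_placeholder_bps = [
--         int(page["bookPage"])
--         for page in ordered_pages
--         if is_placeholder_page(page)
--     ]
--     visible_pages = [
--         page for page in ordered_pages
--         if not is_placeholder_page(page)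
--     ]
--     # 保底：如果整份文档全是占位页，就回退到原始页列表，避免把文档完全隐藏。
--     if ordered_pages and not visible_pages:
--         visible_pages = list(ordered_pages)
--         hidden_placeholder_bps = []
--     visible_page_bps = [int(page["bookPage"]) for page in visible_pages]
--     first_visible_page = visible_page_bps[0] if visible_page_bps else None
--     last_visible_page = visible_page_bps[-1] if visible_page_bps else None
--     return {
--         "visible_pages": visible_pages,
--         "visible_page_bps": visible_page_bps,
--         "hidden_placeholder_bps": hidden_placeholder_bps,
--         "first_visible_page": first_visible_page,
--         "last_visible_page": last_visible_page,
--         "visible_page_count": len(visible_pages),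
--     }
--
-- def resolve_visible_page_bp(pages: list[dict], requested_bp: int | None) -> int | None:
--     view = build_visible_page_view(pages)
--     visible_page_bps = view["visible_page_bps"]
--     if not visible_page_bps:
--         return None
--     if requested_bp is None:
--         return view["first_visible_page"]
--     try:
--         target_bp = int(requested_bp)
--     except (TypeError, ValueError):
--         return view["first_visible_page"]
--     if target_bp in visible_page_bps:
--         return target_bp
--     for bp in visible_page_bps:
--         if bp > target_bp:
--             return bp
--     for bp in reversed(visible_page_bps):
--         if bp < target_bp:
--             return bp
--     return view["first_visible_page"]
-- ===== SOURCE B (Python) =====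
-- def resolve_visible_page_bp(pages, requested_bp):
--     ordered = [
--         (int(page["bookPage"]), bool(page.get("isPlaceholder")))
--         for page in (pages or [])
--         if isinstance(page, dict) and page.get("bookPage") is not None
--     ]
--     bps = [bp for bp, ph in ordered if not ph] or [bp for bp, _ in ordered]
--     if not bps:
--         return None
--     if requested_bp is None:
--         return bps[0]
--     target = int(requested_bp)
--     found = False
--     first_greater = None
--     last_less = None
--     for bp in bps:
--         if bp == target:
--             found = True
--         elif bp > target and first_greater is None:
--             first_greater = bp
--         elif bp < target:
--             last_less = bp
--     if found:
--         return target
--     if first_greater is not None: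
--         return first_greater
--     if last_less is not None:
--         return last_less
--     return bps[0]
-- ===== Notes on version B (the rewrite author's own statement) =====
-- stated objective: simpler
-- what changed: B drops the intermediate view dict, builds the visible book-page list in one comprehension pair, and replaces A's three scans (membership test, forward scan for greater, reversed scan for less) with a single pass that tracks found / first_greater / last_less.
import Mathlib
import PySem

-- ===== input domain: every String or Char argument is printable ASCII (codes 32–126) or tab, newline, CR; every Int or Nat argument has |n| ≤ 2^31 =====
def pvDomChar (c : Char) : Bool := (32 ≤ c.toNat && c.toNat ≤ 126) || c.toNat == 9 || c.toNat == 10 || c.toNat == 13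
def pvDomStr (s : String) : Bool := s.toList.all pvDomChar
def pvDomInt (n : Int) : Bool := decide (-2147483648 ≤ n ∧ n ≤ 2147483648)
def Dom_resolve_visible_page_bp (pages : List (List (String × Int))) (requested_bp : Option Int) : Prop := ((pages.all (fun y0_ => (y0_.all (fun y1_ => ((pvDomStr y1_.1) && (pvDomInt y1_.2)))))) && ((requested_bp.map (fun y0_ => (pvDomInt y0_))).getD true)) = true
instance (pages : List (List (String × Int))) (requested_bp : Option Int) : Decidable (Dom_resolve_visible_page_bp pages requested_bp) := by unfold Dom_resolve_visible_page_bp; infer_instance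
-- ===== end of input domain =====

-- B re-implements A with one selection pass (found / first_greater / last_less) instead of
-- three scans, and without the intermediate view dict; return values are identical.
-- A page dict is an association list (lookup = first match), per the type convention.

-- ===== PORT A =====
-- page.get(k): first match in the association list
def pvGet (page : List (String × Int)) (k : String) : Option Int :=
  (page.find? (fun e => e.1 == k)).map (·.2)

-- bool((page or {}).get("isPlaceholder")): truthiness of the looked-up int (missing → False)
def is_placeholder_page (page : List (String × Int)) : Bool :=
  match pvGet page "isPlaceholder" with
  | some v => v != 0
  | none => false

-- the heterogeneous dict build_visible_page_view returns, as a structure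
structure PageView where
  visible_pages : List (List (String × Int))
  visible_page_bps : List Int
  hidden_placeholder_bps : List Int
  first_visible_page : Option Int
  last_visible_page : Option Int
  visible_page_count : Int
deriving Repr, DecidableEq

def build_visible_page_view (pages : List (List (String × Int))) : PageView :=
  let ordered_pages := pages.filter (fun p => (pvGet p "bookPage").isSome)
  let hidden_placeholder_bps :=
    (ordered_pages.filter is_placeholder_page).map (fun p => (pvGet p "bookPage").getD 0)
  let visible_pages := ordered_pages.filter (fun p => !is_placeholder_page p)
  let (visible_pages, hidden_placeholder_bps) :=
    if !ordered_pages.isEmpty && visible_pages.isEmpty then (ordered_pages, [])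
    else (visible_pages, hidden_placeholder_bps)
  let visible_page_bps := visible_pages.map (fun p => (pvGet p "bookPage").getD 0)
  { visible_pages := visible_pages
    visible_page_bps := visible_page_bps
    hidden_placeholder_bps := hidden_placeholder_bps
    first_visible_page := visible_page_bps.head?
    last_visible_page := visible_page_bps.getLast?
    visible_page_count := (visible_pages.length : Int) }

def resolve_visible_page_bp (pages : List (List (String × Int))) (requested_bp : Option Int) : Option Int :=
  let view := build_visible_page_view pages
  let visible_page_bps := view.visible_page_bps
  if visible_page_bps.isEmpty then none
  else
    match requested_bp with
    | none => view.first_visible_page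
    | some target_bp =>
      if visible_page_bps.contains target_bp then some target_bp
      else
        match visible_page_bps.find? (fun bp => decide (target_bp < bp)) with
        | some bp => some bp
        | none =>
          match visible_page_bps.reverse.find? (fun bp => decide (bp < target_bp)) with
          | some bp => some bp
          | none => view.first_visible_page

-- ===== PORT B =====
-- one fold step over (found, first_greater, last_less)
def pvStep (target : Int) (st : Bool × Option Int × Option Int) (bp : Int) :
    Bool × Option Int × Option Int :=
  if bp == target then (true, st.2)
  else if decide (target < bp) && st.2.1.isNone then (st.1, some bp, st.2.2)
  else if decide (bp < target) then (st.1, st.2.1, some bp)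
  else st

def resolve_visible_page_bp_alt (pages : List (List (String × Int))) (requested_bp : Option Int) : Option Int :=
  let ordered := (pages.filter (fun p => (pvGet p "bookPage").isSome)).map
    (fun p => ((pvGet p "bookPage").getD 0, is_placeholder_page p))
  let visible := (ordered.filter (fun e => !e.2)).map (·.1)
  let bps := if visible.isEmpty then ordered.map (·.1) else visible
  if bps.isEmpty then none
  else
    match requested_bp with
    | none => bps.head?
    | some target =>
      let st := bps.foldl (pvStep target) (false, none, none)
      if st.1 then some target
      else
        match st.2.1 with
        | some g => some g
        | none =>
          match st.2.2 with
          | some l => some l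
          | none => bps.head?

-- ===== PRECONDITION & SPEC =====
def Spec_resolve_visible_page_bp (pages : List (List (String × Int))) (requested_bp : Option Int) (out : Option Int) : Prop := out = resolve_visible_page_bp_alt pages requested_bp
instance (pages : List (List (String × Int))) (requested_bp : Option Int) (out : Option Int) : Decidable (Spec_resolve_visible_page_bp pages requested_bp out) := by unfold Spec_resolve_visible_page_bp; infer_instance

-- ===== CLAIM (what is proved, stated in full; the proofs are below) =====
def Claim_equal_resolve_visible_page_bp : Prop := ∀ (pages : List (List (String × Int))) (requested_bp : Option Int), Dom_resolve_visible_page_bp pages requested_bp → Spec_resolve_visible_page_bp pages requested_bp (resolve_visible_page_bp pages requested_bp)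

-- ===== LEMMAS AND PROOFS =====

-- proof-only helpers: the selection tail of each port, abstracted over the candidate list
def pvSelA (bps : List Int) (requested_bp : Option Int) : Option Int :=
  if bps.isEmpty then none
  else
    match requested_bp with
    | none => bps.head?
    | some target_bp =>
      if bps.contains target_bp then some target_bp
      else
        match bps.find? (fun bp => decide (target_bp < bp)) with
        | some bp => some bp
        | none =>
          match bps.reverse.find? (fun bp => decide (bp < target_bp)) with
          | some bp => some bp
          | none => bps.head?

def pvSelB (bps : List Int) (requested_bp : Option Int) : Option Int :=
  if bps.isEmpty then none
  else
    match requested_bp with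
    | none => bps.head?
    | some target =>
      let st := bps.foldl (pvStep target) (false, none, none)
      if st.1 then some target
      else
        match st.2.1 with
        | some g => some g
        | none =>
          match st.2.2 with
          | some l => some l
          | none => bps.head?

def pvBpsB (pages : List (List (String × Int))) : List Int :=
  let ordered := (pages.filter (fun p => (pvGet p "bookPage").isSome)).map
    (fun p => ((pvGet p "bookPage").getD 0, is_placeholder_page p))
  let visible := (ordered.filter (fun e => !e.2)).map (·.1)
  if visible.isEmpty then ordered.map (·.1) else visible

theorem pvA_eq (pages : List (List (String × Int))) (r : Option Int) :
    resolve_visible_page_bp pages r = pvSelA (build_visible_page_view pages).visible_page_bps r := by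
  rfl

theorem pvB_eq (pages : List (List (String × Int))) (r : Option Int) :
    resolve_visible_page_bp_alt pages r = pvSelB (pvBpsB pages) r := by
  rfl

-- the two versions build the same list of candidate book pages
theorem pvBps_eq (pages : List (List (String × Int))) :
    pvBpsB pages = (build_visible_page_view pages).visible_page_bps := by
  unfold pvBpsB build_visible_page_view
  simp only [List.filter_map, List.map_map]
  set op := pages.filter (fun p => (pvGet p "bookPage").isSome) with hop
  have hco : List.filter ((fun e => !e.2) ∘ fun p => ((pvGet p "bookPage").getD 0, is_placeholder_page p)) op
      = List.filter (fun p => !is_placeholder_page p) op := rfl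
  have hfst : ∀ (l : List (List (String × Int))),
      l.map ((fun (x : Int × Bool) => x.1) ∘ fun p => ((pvGet p "bookPage").getD 0, is_placeholder_page p))
      = l.map (fun p => (pvGet p "bookPage").getD 0) := fun l => rfl
  rw [hco, hfst]
  set vis := op.filter (fun p => !is_placeholder_page p) with hvis
  by_cases h0 : vis.isEmpty
  · have hm : (vis.map (fun p => (pvGet p "bookPage").getD 0)).isEmpty = true := by
      rw [List.isEmpty_iff] at h0 ⊢; simp [h0]
    by_cases h1 : op.isEmpty
    · rw [List.isEmpty_iff] at h0 h1
      simp [h0, h1]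
    · rw [hm]
      simp [h1, h0]
  · have hm : (vis.map (fun p => (pvGet p "bookPage").getD 0)).isEmpty = false := by
      cases hv : vis with
      | nil => rw [hv] at h0; simp at h0
      | cons a t => simp
    simp [hm, h0]

-- characterization of B's single pass, with a generalized accumulator
theorem pvStep_foldl (target : Int) (xs : List Int) (f : Bool) (g l : Option Int) :
    xs.foldl (pvStep target) (f, g, l) =
      (f || xs.contains target,
       g.or (xs.find? (fun bp => decide (target < bp))),
       (xs.reverse.find? (fun bp => decide (bp < target))).or l) := by
  induction xs generalizing f g l with
  | nil => simp
  | cons x xs ih =>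
    simp only [List.foldl_cons, List.reverse_cons, List.find?_append, List.find?_cons,
      List.contains_cons, pvStep]
    rcases lt_trichotomy x target with h | h | h
    · have h1 : (x == target) = false := by simp; omega
      have h1' : (target == x) = false := by simp; omega
      have h2 : decide (target < x) = false := by simp; omega
      have h3 : decide (x < target) = true := by simpa using h
      simp [ih, h1, h1', h2, h3]
    · subst h
      simp [ih]
    · have h1 : (x == target) = false := by simp; omega
      have h1' : (target == x) = false := by simp; omega
      have h2 : decide (target < x) = true := by simpa using h
      have h3 : decide (x < target) = false := by simp; omega
      simp only [h1, h1', h2, h3, Bool.false_eq_true, if_false, Bool.true_and]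
      simp only [List.find?_nil, Option.or_none]
      cases hg : g with
      | none => simp [ih]
      | some gv => simp [ih]

theorem pvSel_eq (bps : List Int) (r : Option Int) : pvSelA bps r = pvSelB bps r := by
  unfold pvSelA pvSelB
  by_cases hE : bps.isEmpty
  · simp [hE]
  · simp only [hE, Bool.false_eq_true, if_false]
    cases r with
    | none => rfl
    | some t =>
      simp only [pvStep_foldl, Bool.false_or, Option.none_or]
      by_cases hc : bps.contains t
      · simp
      · simp only [hc, Bool.false_eq_true, if_false]
        cases hf : bps.find? (fun bp => decide (t < bp)) with
        | some g => rfl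
        | none =>
          cases hl : bps.reverse.find? (fun bp => decide (bp < t)) with
          | some l => rfl
          | none => rfl

-- ===== VERDICT (by name: the statement is the Claim_ definition above) =====
theorem resolve_visible_page_bp_spec : Claim_equal_resolve_visible_page_bp := by
  intro pages requested_bp _
  show resolve_visible_page_bp pages requested_bp = resolve_visible_page_bp_alt pages requested_bp
  rw [pvA_eq, pvB_eq, pvBps_eq, pvSel_eq]
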